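-- pv_equiv track=rewrite | github.com/uglyingni/PBC | Homework/HW5/HW5_4.py | find_closet
-- ===== SOURCE A (Python) =====
-- def find_closet(to_adj_mat, k):
--     # 若to_adj_mat輸出None或是主角節點超出節點範圍，則回傳None
--     if to_adj_mat is None or k > len(to_adj_mat) - 1:
--         closest_num, closest_count = None, None
--     else:
--         closest_num, closest_count = 0, 0
--         for i in range(len(to_adj_mat)):
--             count = 0
--             for j in range(len(to_adj_mat)):
--                 if to_adj_mat[k][j] == 1 and to_adj_mat[i][j] == 1 and k != i:
--                     count += 1
--             if count > closest_count:
--                 closest_num, closest_count = i, count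
--     return closest_num, closest_count
-- ===== SOURCE B (Python) =====
-- def find_closet(to_adj_mat, k):
--     # Scatter accumulation: for each neighbor column of k, add 1 to the count
--     # of every other node adjacent to that column, then take the first node
--     # whose count strictly exceeds the running best, starting from (0, 0).
--     if to_adj_mat is None or k > len(to_adj_mat) - 1:
--         return None, None
--     n = len(to_adj_mat)
--     counts = [0] * n
--     for j in range(n):
--         if to_adj_mat[k][j] == 1:
--             for i in range(n):
--                 if i != k and to_adj_mat[i][j] == 1:
--                     counts[i] += 1
--     best_i, best_c = 0, 0
--     for i, c in enumerate(counts):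
--         if c > best_c:
--             best_i, best_c = i, c
--     return best_i, best_c
-- ===== Notes on version B (the rewrite author's own statement) =====
-- stated objective: alternative
-- what changed: Replaces the per-node gather (nested i-then-j loops recomputing row k's entries) with a scatter accumulation into a counts array over k's neighbor columns (loop order swapped, exclusion of k folded into the scatter) followed by a separate argmax pass; Pre_ excludes only inputs where A raises IndexError (k below -len, row k or a needed row too short).
import Mathlib
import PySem

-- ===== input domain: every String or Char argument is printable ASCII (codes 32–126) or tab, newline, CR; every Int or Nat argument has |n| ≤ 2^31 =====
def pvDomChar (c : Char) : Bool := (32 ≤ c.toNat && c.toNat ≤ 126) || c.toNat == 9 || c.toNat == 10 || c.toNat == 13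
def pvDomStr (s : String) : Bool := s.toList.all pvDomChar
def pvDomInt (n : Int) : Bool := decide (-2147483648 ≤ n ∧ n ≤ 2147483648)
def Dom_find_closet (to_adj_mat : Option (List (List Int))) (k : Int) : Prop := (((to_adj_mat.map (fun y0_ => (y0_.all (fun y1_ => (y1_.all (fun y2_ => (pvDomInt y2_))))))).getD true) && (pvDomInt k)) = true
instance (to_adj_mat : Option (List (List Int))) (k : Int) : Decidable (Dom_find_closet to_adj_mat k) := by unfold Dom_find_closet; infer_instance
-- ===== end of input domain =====

-- B replaces A's per-node gather by a scatter accumulation over k's neighbor columns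
-- plus a separate argmax pass (alternative decomposition; return value proved equal).

-- ===== PORT A =====
-- Out-of-range accesses (which raise IndexError in Python) are rendered with
-- defaults .getD [] / .getD 0; Pre_find_closet excludes exactly those inputs.
def find_closet (to_adj_mat : Option (List (List Int))) (k : Int) : Option Int × Option Int :=
  match to_adj_mat with
  | none => (none, none)
  | some m =>
    if k > (m.length : Int) - 1 then (none, none)
    else
      let n := m.length
      let st := (List.range n).foldl (fun (st : Int × Int) i =>
        let count := (List.range n).foldl (fun (c : Int) j =>
          if ((PySem.List.pyGet? m k).getD []).getD j 0 = 1 ∧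
             (m.getD i []).getD j 0 = 1 ∧ k ≠ (i : Int)
          then c + 1 else c) 0
        if count > st.2 then ((i : Int), count) else st) (0, 0)
      (some st.1, some st.2)

-- ===== PORT B =====
def find_closet_alt (to_adj_mat : Option (List (List Int))) (k : Int) : Option Int × Option Int :=
  match to_adj_mat with
  | none => (none, none)
  | some m =>
    if k > (m.length : Int) - 1 then (none, none)
    else
      let n := m.length
      let rowk := (PySem.List.pyGet? m k).getD []
      let counts := (List.range n).foldl (fun (cs : List Int) j =>
          if rowk.getD j 0 = 1 then
            (List.range n).foldl (fun (cs2 : List Int) (i : Nat) =>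
              if (i : Int) ≠ k ∧ (m.getD i []).getD j 0 = 1
              then cs2.set i (cs2.getD i 0 + 1) else cs2) cs
          else cs)
        (List.replicate n (0 : Int))
      let st := (PySem.List.enumerate counts).foldl
        (fun (st : Int × Int) (p : Int × Int) => if p.2 > st.2 then (p.1, p.2) else st) (0, 0)
      (some st.1, some st.2)

-- ===== PRECONDITION & SPEC =====
-- Pre_ excludes exactly the inputs on which A raises IndexError: k below -len,
-- row k shorter than the matrix, or a row shorter than a neighbor column of k.
def Pre_find_closet (to_adj_mat : Option (List (List Int))) (k : Int) : Prop :=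
  to_adj_mat = none ∨
  (let m := to_adj_mat.getD []
   k > (m.length : Int) - 1 ∨
   (0 ≤ k + (m.length : Int) ∧
    (let rowk := (PySem.List.pyGet? m k).getD []
     m.length ≤ rowk.length ∧
     ∀ j < m.length, rowk.getD j 0 = 1 → ∀ row ∈ m, j < row.length)))
instance (to_adj_mat : Option (List (List Int))) (k : Int) : Decidable (Pre_find_closet to_adj_mat k) := by unfold Pre_find_closet; infer_instance

def pvWitness_find_closet : Option (List (List Int)) × Int := (some [[0, 1], [1, 0]], 0)

def Spec_find_closet (to_adj_mat : Option (List (List Int))) (k : Int) (out : Option Int × Option Int) : Prop := out = find_closet_alt to_adj_mat k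
instance (to_adj_mat : Option (List (List Int))) (k : Int) (out : Option Int × Option Int) : Decidable (Spec_find_closet to_adj_mat k out) := by unfold Spec_find_closet; infer_instance

-- ===== CLAIM (what is proved, stated in full; the proofs are below) =====
def Claim_equal_find_closet : Prop := ∀ (to_adj_mat : Option (List (List Int))) (k : Int), Dom_find_closet to_adj_mat k → Pre_find_closet to_adj_mat k → Spec_find_closet to_adj_mat k (find_closet to_adj_mat k)

-- ===== LEMMAS AND PROOFS =====

-- counting fold = countP
lemma foldl_ite_add_countP (p : Nat → Prop) [DecidablePred p] :
    ∀ (l : List Nat) (c : Int),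
      l.foldl (fun (c : Int) j => if p j then c + 1 else c) c
        = c + (l.countP (fun j => decide (p j)) : Int) := by
  intro l
  induction l with
  | nil => simp
  | cons x t ih =>
    intro c
    by_cases h : p x
    · simp [h, ih]; ring
    · simp [h, ih]

-- one scatter pass (fixed column): length is preserved
lemma scatter_length (p : Nat → Prop) [DecidablePred p] :
    ∀ (t : Nat) (cs : List Int),
      ((List.range t).foldl (fun (cs2 : List Int) (i : Nat) =>
          if p i then cs2.set i (cs2.getD i 0 + 1) else cs2) cs).length = cs.length := by
  intro t
  induction t with
  | zero => simp
  | succ t ih =>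
    intro cs
    rw [List.range_succ, List.foldl_append]
    simp only [List.foldl_cons, List.foldl_nil]
    split
    · rw [List.length_set, ih]
    · exact ih cs

-- one scatter pass: effect on each entry
lemma scatter_getD (p : Nat → Prop) [DecidablePred p] :
    ∀ (t : Nat) (cs : List Int) (i : Nat), i < cs.length →
      ((List.range t).foldl (fun (cs2 : List Int) i' =>
          if p i' then cs2.set i' (cs2.getD i' 0 + 1) else cs2) cs).getD i 0
        = cs.getD i 0 + (if i < t ∧ p i then 1 else 0) := by
  intro t
  induction t with
  | zero => intro cs i hi; simp
  | succ t ih =>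
    intro cs i hi
    rw [List.range_succ, List.foldl_append]
    have hlen := scatter_length p t cs
    by_cases hpt : p t
    · simp only [List.foldl_cons, List.foldl_nil, if_pos hpt]
      by_cases hit : i = t
      · subst hit
        have hlt : i < ((List.range i).foldl (fun (cs2 : List Int) i' =>
            if p i' then cs2.set i' (cs2.getD i' 0 + 1) else cs2) cs).length := by
          rw [hlen]; exact hi
        rw [List.getD_eq_getElem?_getD, List.getElem?_set_self hlt]
        simp only [Option.getD_some]
        rw [ih cs i hi]
        simp [hpt]
      · rw [List.getD_eq_getElem?_getD, List.getElem?_set_ne (by omega)]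
        rw [← List.getD_eq_getElem?_getD, ih cs i hi]
        have : (i < t ∧ p i) ↔ (i < t + 1 ∧ p i) := by
          constructor <;> rintro ⟨h1, h2⟩ <;> exact ⟨by omega, h2⟩
        simp [this]
    · simp only [List.foldl_cons, List.foldl_nil, if_neg hpt]
      rw [ih cs i hi]
      have : (i < t ∧ p i) ↔ (i < t + 1 ∧ p i) := by
        constructor <;> rintro ⟨h1, h2⟩
        · exact ⟨by omega, h2⟩
        · refine ⟨?_, h2⟩; rcases Nat.lt_succ_iff_lt_or_eq.1 h1 with h | h
          · exact h
          · exact absurd (h ▸ h2) hpt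
      simp [this]

-- the guarded outer scatter over a list of columns: length preserved
lemma scatterAll_length (p : Nat → Prop) [DecidablePred p]
    (q : Nat → Nat → Prop) [∀ i j, Decidable (q i j)] (n : Nat) :
    ∀ (L : List Nat) (cs : List Int),
      (L.foldl (fun (cs : List Int) j =>
          if p j then
            (List.range n).foldl (fun (cs2 : List Int) (i : Nat) =>
              if q i j then cs2.set i (cs2.getD i 0 + 1) else cs2) cs
          else cs) cs).length = cs.length := by
  intro L
  induction L with
  | nil => simp
  | cons x t ih =>
    intro cs
    simp only [List.foldl_cons]
    by_cases hp : p x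
    · rw [if_pos hp, ih, scatter_length]
    · rw [if_neg hp, ih]

-- the guarded outer scatter: entry i counts the columns j ∈ L with p j ∧ q i j
lemma scatterAll_getD (p : Nat → Prop) [DecidablePred p]
    (q : Nat → Nat → Prop) [∀ i j, Decidable (q i j)] (n : Nat) :
    ∀ (L : List Nat) (cs : List Int), cs.length = n → ∀ i, i < n →
      (L.foldl (fun (cs : List Int) j =>
          if p j then
            (List.range n).foldl (fun (cs2 : List Int) (i : Nat) =>
              if q i j then cs2.set i (cs2.getD i 0 + 1) else cs2) cs
          else cs) cs).getD i 0
        = cs.getD i 0 + (L.countP (fun j => decide (p j ∧ q i j)) : Int) := by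
  intro L
  induction L with
  | nil => intro cs hcs i hi; simp
  | cons x t ih =>
    intro cs hcs i hi
    simp only [List.foldl_cons]
    by_cases hp : p x
    · rw [if_pos hp,
          ih _ (by rw [scatter_length (fun i => q i x) n cs]; exact hcs) i hi,
          scatter_getD (fun i => q i x) n cs i (by omega)]
      by_cases h : q i x
      · simp [h, hp, hi]; ring
      · simp [h, hp, hi]
    · rw [if_neg hp, ih _ hcs i hi]
      simp [hp]

-- both argmax folds agree when the per-index counts agree
lemma argmax_range_eq_pyRange (c : Nat → Int) (cI : Int → Int) :
    ∀ (n : Nat), (∀ i : Nat, i < n → cI (i : Int) = c i) → ∀ (st : Int × Int),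
      (List.range n).foldl (fun (st : Int × Int) i =>
          if c i > st.2 then ((i : Int), c i) else st) st
        = (PySem.List.pyRange 0 (n : Int) 1).foldl (fun (st : Int × Int) j =>
          if cI j > st.2 then (j, cI j) else st) st := by
  intro n
  induction n with
  | zero => intro _ st; simp [PySem.List.pyRange_one_eq_nil]
  | succ n ih =>
    intro h st
    rw [List.range_succ, List.foldl_append,
        show ((n + 1 : Nat) : Int) = (n : Int) + 1 by push_cast; ring,
        PySem.List.pyRange_one_succ_right (by positivity), List.foldl_append]
    rw [ih (fun i hi => h i (by omega)) st]
    simp only [List.foldl_cons, List.foldl_nil]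
    rw [h n (by omega)]

-- the main per-matrix computation lemma
lemma find_closet_eq_alt_some (m : List (List Int)) (k : Int)
    (hk : ¬ k > (m.length : Int) - 1) :
    find_closet (some m) k = find_closet_alt (some m) k := by
  simp only [find_closet, find_closet_alt, if_neg hk]
  set n := m.length with hn
  set rowk := (PySem.List.pyGet? m k).getD [] with hrowk
  set counts := (List.range n).foldl (fun (cs : List Int) j =>
      if rowk.getD j 0 = 1 then
        (List.range n).foldl (fun (cs2 : List Int) (i : Nat) =>
          if (i : Int) ≠ k ∧ (m.getD i []).getD j 0 = 1
          then cs2.set i (cs2.getD i 0 + 1) else cs2) cs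
      else cs)
    (List.replicate n (0 : Int)) with hcounts
  have hclen : counts.length = n := by
    rw [hcounts, scatterAll_length (fun j => rowk.getD j 0 = 1)
        (fun i j => (i : Int) ≠ k ∧ (m.getD i []).getD j 0 = 1) n]
    simp
  -- A's inner count for node i equals counts's entry i
  have hmain : ∀ i, i < n →
      (List.range n).foldl (fun (c : Int) j =>
        if rowk.getD j 0 = 1 ∧ (m.getD i []).getD j 0 = 1 ∧ k ≠ (i : Int)
        then c + 1 else c) 0 = counts.getD i 0 := by
    intro i hi
    rw [foldl_ite_add_countP
        (fun j => rowk.getD j 0 = 1 ∧ (m.getD i []).getD j 0 = 1 ∧ k ≠ (i : Int))]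
    rw [hcounts, scatterAll_getD (fun j => rowk.getD j 0 = 1)
        (fun i j => (i : Int) ≠ k ∧ (m.getD i []).getD j 0 = 1) n
        (List.range n) (List.replicate n (0 : Int)) (by simp) i hi]
    simp only [List.getD_replicate, hi, zero_add, Nat.cast_inj]
    apply List.countP_congr
    intro j _
    simp only [decide_eq_true_eq]
    constructor
    · rintro ⟨a, b, c⟩; exact ⟨a, fun h => c h.symm, b⟩
    · rintro ⟨a, b, c⟩; exact ⟨a, c, fun h => b h.symm⟩
  -- now align the two argmax folds
  have henum : PySem.List.enumerate counts
      = (PySem.List.pyRange 0 (counts.length : Int) 1).map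
          (fun j => (j, PySem.List.pyGetD counts j 0)) :=
    PySem.List.enumerate_eq_map_pyRange counts 0
  rw [henum, List.foldl_map, hclen]
  rw [argmax_range_eq_pyRange
      (fun i => (List.range n).foldl (fun (c : Int) j =>
        if rowk.getD j 0 = 1 ∧ (m.getD i []).getD j 0 = 1 ∧ k ≠ (i : Int)
        then c + 1 else c) 0)
      (fun j => PySem.List.pyGetD counts j 0) n
      (fun i hi => by
        simp only [PySem.List.pyGetD_natCast]
        exact (hmain i hi).symm)]

-- ===== VERDICT (by name: the statement is the Claim_ definition above) =====
theorem find_closet_spec : Claim_equal_find_closet := by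
  intro to_adj_mat k _ _
  unfold Spec_find_closet
  match to_adj_mat with
  | none => rfl
  | some m =>
    by_cases hk : k > (m.length : Int) - 1
    · simp [find_closet, find_closet_alt, hk]
    · exact find_closet_eq_alt_some m k hk
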